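-- pv_equiv track=rewrite | github.com/Yalies/api | app/scraper/sources/departmental.py | name_matches
-- ===== SOURCE A (Python) =====
-- def name_matches(person, name):
--     names = name.split()
--     for divider in range(1, len(names)):
--         first_name = ' '.join(names[:divider])
--         last_name = ' '.join(names[divider:])
--         if person.get('first_name') == first_name and person.get('last_name') == last_name:
--             return True
--     return False
-- ===== SOURCE B (Python) =====
-- def name_matches(person, name):
--     first = person.get('first_name')
--     last = person.get('last_name')
--     if first is None or last is None:
--         return False
--     return ' '.join(name.split()) == first + ' ' + last
-- ===== Notes on version B (the rewrite author's own statement) =====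
-- stated objective: simpler
-- what changed: Replaces the loop over all split points (rebuilding two joined strings per divider) by one direct comparison: the whitespace-normalized name equals first_name + ' ' + last_name, which is equivalent because the words of a split are nonempty and space-free, so the space after the first_name prefix pins the unique divider.
import Mathlib
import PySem

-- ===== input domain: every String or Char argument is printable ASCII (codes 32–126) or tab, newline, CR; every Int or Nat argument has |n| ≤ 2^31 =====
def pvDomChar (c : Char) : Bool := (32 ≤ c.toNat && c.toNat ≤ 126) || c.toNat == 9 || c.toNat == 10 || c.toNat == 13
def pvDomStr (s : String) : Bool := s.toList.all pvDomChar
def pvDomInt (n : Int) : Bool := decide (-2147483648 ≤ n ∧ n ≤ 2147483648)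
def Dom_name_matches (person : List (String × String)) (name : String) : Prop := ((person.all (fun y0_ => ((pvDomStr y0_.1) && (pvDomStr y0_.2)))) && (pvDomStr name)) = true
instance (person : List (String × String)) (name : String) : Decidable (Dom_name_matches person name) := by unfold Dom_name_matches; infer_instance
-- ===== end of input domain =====

-- B replaces A's loop over all split points by one direct comparison of the
-- whitespace-normalized name with first_name + ' ' + last_name (simpler; same result).

-- ===== PORT A =====
-- the for-loop with its early 'return True'; Python's `person.get(k) == s` is `get? = some s` (None == str is False)
def nmLoop (person : List (String × String)) (names : List String) : List Int → Bool
  | [] => false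
  | divider :: rest =>
    let first_name := PySem.Str.join " " (PySem.List.slice names none (some divider))
    let last_name := PySem.Str.join " " (PySem.List.slice names (some divider) none)
    if ((PySem.Dict.mk person).get? "first_name" == some first_name)
        && ((PySem.Dict.mk person).get? "last_name" == some last_name) then true
    else nmLoop person names rest

def name_matches (person : List (String × String)) (name : String) : Bool :=
  let names := PySem.Str.split₀ name
  nmLoop person names (PySem.List.pyRange 1 (names.length : Int) 1)

-- ===== PORT B =====
def name_matches_alt (person : List (String × String)) (name : String) : Bool :=
  match (PySem.Dict.mk person).get? "first_name", (PySem.Dict.mk person).get? "last_name" with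
  | some first, some last =>
      PySem.Str.join " " (PySem.Str.split₀ name) == first ++ " " ++ last
  | _, _ => false

-- ===== PRECONDITION & SPEC =====
def Spec_name_matches (person : List (String × String)) (name : String) (out : Bool) : Prop := out = name_matches_alt person name
instance (person : List (String × String)) (name : String) (out : Bool) : Decidable (Spec_name_matches person name out) := by unfold Spec_name_matches; infer_instance

-- ===== CLAIM (what is proved, stated in full; the proofs are below) =====
def Claim_equal_name_matches : Prop := ∀ (person : List (String × String)) (name : String), Dom_name_matches person name → Spec_name_matches person name (name_matches person name)

-- ===== LEMMAS AND PROOFS =====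

-- every word produced by str.split() is nonempty and contains no whitespace character
theorem pv_go_words : ∀ (cs cur : List Char) (acc : List (List Char)),
    (∀ c ∈ cur, PySem.Chars.isspace c = false) →
    (∀ w ∈ acc, w ≠ [] ∧ ∀ c ∈ w, PySem.Chars.isspace c = false) →
    ∀ w ∈ PySem.Chars.split₀.go cs cur acc, w ≠ [] ∧ ∀ c ∈ w, PySem.Chars.isspace c = false := by
  intro cs
  induction cs with
  | nil =>
    intro cur acc hcur hacc w hw
    simp only [PySem.Chars.split₀.go] at hw
    split at hw
    · exact hacc w (List.mem_reverse.mp hw)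
    · rename_i hne
      rcases List.mem_cons.mp (List.mem_reverse.mp hw) with rfl | hmem
      · refine ⟨?_, ?_⟩
        · simp only [ne_eq, List.reverse_eq_nil_iff]
          intro h; rw [h] at hne; simp at hne
        · intro c hc; exact hcur c (List.mem_reverse.mp hc)
      · exact hacc w hmem
  | cons c rest ih =>
    intro cur acc hcur hacc w hw
    simp only [PySem.Chars.split₀.go] at hw
    split at hw
    · split at hw
      · exact ih [] acc (by simp) hacc w hw
      · rename_i hne
        refine ih [] _ (by simp) ?_ w hw
        intro w' hw'
        rcases List.mem_cons.mp hw' with rfl | h'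
        · refine ⟨?_, ?_⟩
          · simp only [ne_eq, List.reverse_eq_nil_iff]
            intro h; rw [h] at hne; simp at hne
          · intro c' hc'; exact hcur c' (List.mem_reverse.mp hc')
        · exact hacc w' h'
    · rename_i hns
      refine ih (c :: cur) acc ?_ hacc w hw
      intro c' hc'
      rcases List.mem_cons.mp hc' with rfl | h'
      · simpa using hns
      · exact hcur c' h'

theorem pv_split₀_words (cs : List Char) :
    ∀ w ∈ PySem.Chars.split₀ cs, w ≠ [] ∧ ∀ c ∈ w, PySem.Chars.isspace c = false := by
  intro w hw
  exact pv_go_words cs [] [] (by simp) (by simp) w (by simpa [PySem.Chars.split₀] using hw)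

-- join over ' ' splits across a (nonempty ++ nonempty) concatenation
theorem pv_join_append (xs ys : List (List Char)) (hxs : xs ≠ []) (hys : ys ≠ []) :
    PySem.Chars.join [' '] (xs ++ ys) = PySem.Chars.join [' '] xs ++ ' ' :: PySem.Chars.join [' '] ys := by
  revert hxs
  induction xs with
  | nil => intro h; exact absurd rfl h
  | cons x xs ih =>
    intro _
    cases xs with
    | nil =>
      cases ys with
      | nil => exact absurd rfl hys
      | cons y ys' =>
        simp [PySem.Chars.join_cons_cons, PySem.Chars.join_singleton]
    | cons x2 xs2 =>
      have h2 := ih (by simp)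
      simp only [List.cons_append, PySem.Chars.join_cons_cons] at h2 ⊢
      rw [show x2 :: (xs2 ++ ys) = (x2 :: xs2) ++ ys from rfl] at *
      rw [h2]
      simp

-- decomposing an equality around a space when the first block is space-free
theorem pv_split_at_space {w x pf pl : List Char} (hw : ' ' ∉ w)
    (h : w ++ ' ' :: x = pf ++ ' ' :: pl) :
    (pf = w ∧ pl = x) ∨ (∃ pf', pf = w ++ ' ' :: pf' ∧ x = pf' ++ ' ' :: pl) := by
  rcases lt_trichotomy pf.length w.length with hlt | heq | hgt
  · exfalso
    apply hw
    have h1 : (w ++ ' ' :: x)[pf.length]? = some ' ' := by rw [h]; simp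
    have h2 : (w ++ ' ' :: x)[pf.length]? = w[pf.length]? := List.getElem?_append_left hlt
    have h3 : w[pf.length]? = some ' ' := h2 ▸ h1
    exact List.mem_of_getElem? h3
  · obtain ⟨h1, h2⟩ := List.append_inj h heq.symm
    left
    refine ⟨h1.symm, ?_⟩
    injection h2 with _ hb
    exact hb.symm
  · have hpre : w <+: pf :=
      List.prefix_of_prefix_length_le (h ▸ List.prefix_append w (' ' :: x))
        (List.prefix_append pf (' ' :: pl)) (by omega)
    obtain ⟨t, rfl⟩ := hpre
    have h2 : ' ' :: x = t ++ ' ' :: pl := by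
      rw [List.append_assoc] at h
      exact List.append_cancel_left h
    cases t with
    | nil => simp at hgt
    | cons c t' =>
      simp only [List.cons_append] at h2
      injection h2 with ha hb
      right
      refine ⟨t', ?_, hb⟩
      rw [← ha]

-- the characterization: some divider matches iff the joined words equal pf ++ ' ' :: pl
theorem pv_join_split_iff : ∀ (ws : List (List Char)),
    (∀ w ∈ ws, w ≠ [] ∧ ' ' ∉ w) → ∀ (pf pl : List Char),
    ((∃ k : ℕ, 1 ≤ k ∧ k < ws.length ∧
        PySem.Chars.join [' '] (ws.take k) = pf ∧ PySem.Chars.join [' '] (ws.drop k) = pl)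
      ↔ PySem.Chars.join [' '] ws = pf ++ ' ' :: pl) := by
  intro ws
  induction ws with
  | nil =>
    intro _ pf pl
    constructor
    · rintro ⟨k, h1, h2, -⟩; simp at h2
    · intro hcontra
      exfalso
      have := congrArg List.length hcontra
      simp [PySem.Chars.join_nil] at this
  | cons w rest ih =>
    intro h pf pl
    obtain ⟨hw1, hw2⟩ := h w (by simp)
    have hrest : ∀ w' ∈ rest, w' ≠ [] ∧ ' ' ∉ w' := fun w' hw' => h w' (by simp [hw'])
    cases rest with
    | nil =>
      constructor
      · rintro ⟨k, h1, h2, -⟩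
        simp only [List.length_cons, List.length_nil] at h2
        omega
      · intro hcontra
        exfalso
        rw [PySem.Chars.join_singleton] at hcontra
        exact hw2 (hcontra ▸ (by simp : ' ' ∈ pf ++ ' ' :: pl))
    | cons r rs =>
      have hJ : PySem.Chars.join [' '] (w :: r :: rs) = w ++ ' ' :: PySem.Chars.join [' '] (r :: rs) := by
        rw [PySem.Chars.join_cons_cons]; simp
      constructor
      · rintro ⟨k, h1, h2, h3, h4⟩
        cases k with
        | zero => omega
        | succ k' =>
          cases k' with
          | zero =>
            simp only [List.take_succ_cons, List.take_zero, List.drop_succ_cons, List.drop_zero] at h3 h4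
            rw [PySem.Chars.join_singleton] at h3
            rw [hJ, h3, h4]
          | succ k'' =>
            rw [List.take_succ_cons] at h3
            rw [List.drop_succ_cons] at h4
            have hlen : k'' + 1 < (r :: rs).length := by
              simp only [List.length_cons] at h2 ⊢
              omega
            have htne : (r :: rs).take (k'' + 1) ≠ [] := by simp
            have hdne : (r :: rs).drop (k'' + 1) ≠ [] := by
              intro hd
              rw [List.drop_eq_nil_iff] at hd
              omega
            have hsplit : PySem.Chars.join [' '] (r :: rs) =
                PySem.Chars.join [' '] ((r :: rs).take (k'' + 1)) ++ ' ' ::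
                  PySem.Chars.join [' '] ((r :: rs).drop (k'' + 1)) := by
              conv_lhs => rw [← List.take_append_drop (k'' + 1) (r :: rs)]
              exact pv_join_append _ _ htne hdne
            have h3' : pf = w ++ ' ' :: PySem.Chars.join [' '] ((r :: rs).take (k'' + 1)) := by
              rw [← h3]
              cases htake : (r :: rs).take (k'' + 1) with
              | nil => exact absurd htake htne
              | cons a as =>
                rw [PySem.Chars.join_cons_cons]
                simp
            rw [hJ, hsplit, h3', h4]
            simp
      · intro heq
        rw [hJ] at heq
        rcases pv_split_at_space hw2 heq with ⟨rfl, rfl⟩ | ⟨pf', rfl, hx⟩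
        · exact ⟨1, le_refl 1, by simp, by simp [PySem.Chars.join_singleton], by simp⟩
        · obtain ⟨k', hk1, hk2, hk3, hk4⟩ := (ih hrest pf' pl).mpr hx
          have htne : (r :: rs).take k' ≠ [] := by
            cases k' with
            | zero => omega
            | succ m => simp
          refine ⟨k' + 1, by omega, by simp only [List.length_cons] at hk2 ⊢; omega, ?_, by simpa using hk4⟩
          simp only [List.take_succ_cons]
          cases htake : (r :: rs).take k' with
          | nil => exact absurd htake htne
          | cons a as =>
            rw [htake] at hk3
            rw [PySem.Chars.join_cons_cons, hk3]
            simp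

theorem pv_nmLoop_eq_any (person : List (String × String)) (names : List String) (ds : List Int) :
    nmLoop person names ds = ds.any (fun d =>
      ((PySem.Dict.mk person).get? "first_name" == some (PySem.Str.join " " (PySem.List.slice names none (some d))))
      && ((PySem.Dict.mk person).get? "last_name" == some (PySem.Str.join " " (PySem.List.slice names (some d) none)))) := by
  induction ds with
  | nil => rfl
  | cons d rest ih =>
      simp only [nmLoop, List.any_cons, ih]
      split <;> simp_all

-- the divider-existence condition at String level equals B's single comparison
theorem pv_main_iff (names : List String)
    (hw : ∀ w ∈ names.map String.toList, w ≠ [] ∧ ' ' ∉ w) (pf pl : String) :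
    (∃ d : Int, (1 ≤ d ∧ d < (names.length : Int)) ∧
        PySem.Str.join " " (PySem.List.slice names none (some d)) = pf ∧
        PySem.Str.join " " (PySem.List.slice names (some d) none) = pl)
      ↔ PySem.Str.join " " names = pf ++ " " ++ pl := by
  have hchar := pv_join_split_iff (names.map String.toList) hw pf.toList pl.toList
  have hsep : (" " : String).toList = [' '] := rfl
  have toLJ : ∀ l : List String,
      (PySem.Str.join " " l).toList = PySem.Chars.join [' '] (l.map String.toList) := by
    intro l; rw [PySem.Str.toList_join, hsep]
  constructor
  · rintro ⟨d, ⟨hd1, hd2⟩, h1, h2⟩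
    rw [PySem.List.slice_to names (by omega : (0:Int) ≤ d)] at h1
    rw [PySem.List.slice_from names (by omega : (0:Int) ≤ d)] at h2
    apply String.toList_inj.mp
    rw [toLJ, String.toList_append, String.toList_append, hsep]
    have hmain : PySem.Chars.join [' '] (names.map String.toList) = pf.toList ++ ' ' :: pl.toList := by
      apply hchar.mp
      refine ⟨d.toNat, by omega, by rw [List.length_map]; omega, ?_, ?_⟩
      · rw [← List.map_take, ← toLJ, h1]
      · rw [← List.map_drop, ← toLJ, h2]
    rw [hmain]
    simp
  · intro hh
    have hmain : PySem.Chars.join [' '] (names.map String.toList) = pf.toList ++ ' ' :: pl.toList := by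
      have hc := congrArg String.toList hh
      rw [toLJ, String.toList_append, String.toList_append, hsep] at hc
      simpa using hc
    obtain ⟨k, hk1, hk2, hk3, hk4⟩ := hchar.mpr hmain
    rw [List.length_map] at hk2
    refine ⟨(k : Int), ⟨by exact_mod_cast hk1, by exact_mod_cast hk2⟩, ?_, ?_⟩
    · rw [PySem.List.slice_to names (by positivity : (0:Int) ≤ (k : Int))]
      apply String.toList_inj.mp
      rw [toLJ]
      simp only [Int.toNat_natCast]
      rw [← List.map_take] at hk3
      rw [hk3]
    · rw [PySem.List.slice_from names (by positivity : (0:Int) ≤ (k : Int))]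
      apply String.toList_inj.mp
      rw [toLJ]
      simp only [Int.toNat_natCast]
      rw [← List.map_drop] at hk4
      rw [hk4]

-- ===== VERDICT (by name: the statement is the Claim_ definition above) =====
theorem name_matches_spec : Claim_equal_name_matches := by
  intro person name _
  show name_matches person name = name_matches_alt person name
  simp only [name_matches, name_matches_alt]
  rw [pv_nmLoop_eq_any]
  cases hf : (PySem.Dict.mk person).get? "first_name" with
  | none => simp
  | some pf =>
    cases hl : (PySem.Dict.mk person).get? "last_name" with
    | none => simp
    | some pl =>
      have hwords : ∀ w ∈ (PySem.Str.split₀ name).map String.toList, w ≠ [] ∧ ' ' ∉ w := by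
        rw [PySem.Str.split₀_map_toList]
        intro w hmem
        obtain ⟨h1, h2⟩ := pv_split₀_words name.toList w hmem
        refine ⟨h1, fun hsp => ?_⟩
        exact absurd (h2 ' ' hsp) (by decide)
      have hm := pv_main_iff (PySem.Str.split₀ name) hwords pf pl
      apply Bool.coe_iff_coe.mp
      simp only [List.any_eq_true, Bool.and_eq_true, beq_iff_eq, Option.some.injEq,
        PySem.List.mem_pyRange_one]
      constructor
      · rintro ⟨d, ⟨hd1, hd2⟩, h1, h2⟩
        exact hm.mp ⟨d, ⟨hd1, hd2⟩, h1.symm, h2.symm⟩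
      · intro hh
        obtain ⟨d, ⟨hd1, hd2⟩, h1, h2⟩ := hm.mpr hh
        exact ⟨d, ⟨hd1, hd2⟩, h1.symm, h2.symm⟩
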